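-- pv_equiv track=rewrite | github.com/rookinc/hyperxi_lab | scripts/estimate_automorphism_group.py | edge_signature
-- ===== SOURCE A (Python) =====
-- from collections import Counter, defaultdict, deque
--
-- def edge_signature(adj, u, v):
--     nu = adj[u] - {v}
--     nv = adj[v] - {u}
--     common = nu & nv
--     only_u = nu - nv
--     only_v = nv - nu
--
--     cross = Counter()
--     for a in only_u:
--         for b in only_v:
--             cross[len(adj[a] & adj[b])] += 1
--
--     return (
--         len(common),
--         len(only_u),
--         len(only_v),
--         tuple(sorted(cross.items())),
--     )
-- ===== SOURCE B (Python) =====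
-- from collections import Counter
--
-- def edge_signature(adj, u, v):
--     # Inverted computation: bucket only_u/only_v members by shared neighbor,
--     # then count pair co-occurrences instead of intersecting every pair.
--     nu = adj[u] - {v}
--     nv = adj[v] - {u}
--     common = nu & nv
--     only_u = nu - nv
--     only_v = nv - nu
--     pc = {}
--     if only_u and only_v:
--         mu = {}
--         for a in only_u:
--             for c in adj[a]:
--                 mu.setdefault(c, []).append(a)
--         mv = {}
--         for b in only_v:
--             for c in adj[b]:
--                 mv.setdefault(c, []).append(b)
--         for c, As in mu.items():
--             Bs = mv.get(c)
--             if Bs: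
--                 for a in As:
--                     for b in Bs:
--                         pc[(a, b)] = pc.get((a, b), 0) + 1
--     cross = Counter(pc.values())
--     zero = len(only_u) * len(only_v) - len(pc)
--     if zero > 0:
--         cross[0] = zero
--     return (len(common), len(only_u), len(only_v), tuple(sorted(cross.items())))
-- ===== Notes on version B (the rewrite author's own statement) =====
-- stated objective: alternative
-- what changed: Instead of intersecting adjacency sets for every pair in only_u x only_v, B buckets only_u/only_v members by shared neighbor c and increments a per-pair co-occurrence counter, deriving the zero-intersection count arithmetically as |only_u|*|only_v| - len(pc).
import Mathlib
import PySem

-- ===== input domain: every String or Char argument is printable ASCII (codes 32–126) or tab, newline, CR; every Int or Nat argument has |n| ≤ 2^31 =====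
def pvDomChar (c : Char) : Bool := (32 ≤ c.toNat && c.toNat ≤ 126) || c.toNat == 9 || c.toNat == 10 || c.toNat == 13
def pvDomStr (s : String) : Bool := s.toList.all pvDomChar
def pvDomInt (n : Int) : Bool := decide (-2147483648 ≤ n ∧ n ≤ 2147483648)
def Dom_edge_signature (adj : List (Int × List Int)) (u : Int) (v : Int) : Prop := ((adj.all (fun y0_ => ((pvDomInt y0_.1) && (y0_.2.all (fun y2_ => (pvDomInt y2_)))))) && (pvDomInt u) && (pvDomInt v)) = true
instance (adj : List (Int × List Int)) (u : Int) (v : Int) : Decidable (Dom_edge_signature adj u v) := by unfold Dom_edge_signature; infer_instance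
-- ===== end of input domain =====

-- B replaces the per-pair set intersections by shared-neighbor buckets and a pair co-occurrence
-- counter (the zero bucket is derived arithmetically); objective: alternative decomposition.

-- the Python argument `adj` is a dict[int, set[int]]: decode the association list as Python's
-- dict(...) does (later binding of a duplicate key overwrites), each value list as a set
def pvDictOf (adj : List (Int × List Int)) : PySem.Dict Int (List Int) :=
  PySem.Dict.update PySem.Dict.empty adj

-- adj[x] as a PySem.Set ([] only when x is not a key, which Pre_ excludes at every used x)
def pvAdjAt (d : PySem.Dict Int (List Int)) (x : Int) : PySem.Set Int :=
  PySem.Set.ofList (PySem.Dict.getD d x [])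

-- ===== PORT A =====
def edge_signature (adj : List (Int × List Int)) (u : Int) (v : Int) : Int × Int × Int × (List (Int × Int)) :=
  let d := pvDictOf adj
  let nu := PySem.Set.diff (pvAdjAt d u) (PySem.Set.ofList [v])
  let nv := PySem.Set.diff (pvAdjAt d v) (PySem.Set.ofList [u])
  let common := PySem.Set.inter nu nv
  let onlyU := PySem.Set.diff nu nv
  let onlyV := PySem.Set.diff nv nu
  let cross : PySem.Dict Int Int :=
    List.foldl (fun c a =>
      List.foldl (fun c b =>
        PySem.Dict.modify c (PySem.Set.len (PySem.Set.inter (pvAdjAt d a) (pvAdjAt d b))) 0 (· + 1)) c onlyV)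
      PySem.Dict.empty onlyU
  (PySem.Set.len common, PySem.Set.len onlyU, PySem.Set.len onlyV,
   PySem.List.sorted2 cross.items Prod.fst Prod.snd false)

-- ===== PORT B =====
def edge_signature_alt (adj : List (Int × List Int)) (u : Int) (v : Int) : Int × Int × Int × (List (Int × Int)) :=
  let d := pvDictOf adj
  let nu := PySem.Set.diff (pvAdjAt d u) (PySem.Set.ofList [v])
  let nv := PySem.Set.diff (pvAdjAt d v) (PySem.Set.ofList [u])
  let common := PySem.Set.inter nu nv
  let onlyU := PySem.Set.diff nu nv
  let onlyV := PySem.Set.diff nv nu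
  let pc : PySem.Dict (Int × Int) Int :=
    if onlyU ≠ [] ∧ onlyV ≠ [] then
      let mu : PySem.Dict Int (List Int) :=
        List.foldl (fun m a => List.foldl (fun m c => PySem.Dict.modify m c [] (· ++ [a])) m (pvAdjAt d a))
          PySem.Dict.empty onlyU
      let mv : PySem.Dict Int (List Int) :=
        List.foldl (fun m b => List.foldl (fun m c => PySem.Dict.modify m c [] (· ++ [b])) m (pvAdjAt d b))
          PySem.Dict.empty onlyV
      List.foldl (fun pc cAs =>
        let Bs := PySem.Dict.getD mv cAs.1 []
        if Bs ≠ [] then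
          List.foldl (fun pc a => List.foldl (fun pc b => PySem.Dict.modify pc (a, b) 0 (· + 1)) pc Bs) pc cAs.2
        else pc)
        PySem.Dict.empty mu.items
    else PySem.Dict.empty
  let cross := PySem.Dict.counter pc.values
  let zero : Int := PySem.Set.len onlyU * PySem.Set.len onlyV - (pc.size : Int)
  let cross := if 0 < zero then cross.insert 0 zero else cross
  (PySem.Set.len common, PySem.Set.len onlyU, PySem.Set.len onlyV,
   PySem.List.sorted2 cross.items Prod.fst Prod.snd false)

-- ===== PRECONDITION & SPEC =====
-- Pre_ excludes exactly the inputs where the Python A raises KeyError: u or v not a key of adj,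
-- or (when both residual sides are nonempty, so the pair loop runs) a member of only_u/only_v
-- that is not a key of adj.
def Pre_edge_signature (adj : List (Int × List Int)) (u : Int) (v : Int) : Prop :=
  let d := pvDictOf adj
  (d.contains u = true) ∧ (d.contains v = true) ∧
  (let nu := PySem.Set.diff (pvAdjAt d u) (PySem.Set.ofList [v])
   let nv := PySem.Set.diff (pvAdjAt d v) (PySem.Set.ofList [u])
   let onlyU := PySem.Set.diff nu nv
   let onlyV := PySem.Set.diff nv nu
   onlyU ≠ [] → onlyV ≠ [] →
     (∀ a ∈ onlyU, d.contains a = true) ∧ (∀ b ∈ onlyV, d.contains b = true))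
instance (adj : List (Int × List Int)) (u : Int) (v : Int) : Decidable (Pre_edge_signature adj u v) := by
  unfold Pre_edge_signature; infer_instance

def pvWitness_edge_signature : (List (Int × List Int)) × Int × Int :=
  ([(0, [2]), (1, [3]), (2, [3]), (3, [2])], 0, 1)

def Spec_edge_signature (adj : List (Int × List Int)) (u : Int) (v : Int) (out : Int × Int × Int × (List (Int × Int))) : Prop := out = edge_signature_alt adj u v
instance (adj : List (Int × List Int)) (u : Int) (v : Int) (out : Int × Int × Int × (List (Int × Int))) : Decidable (Spec_edge_signature adj u v out) := by unfold Spec_edge_signature; infer_instance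

-- ===== CLAIM (what is proved, stated in full; the proofs are below) =====
def Claim_equal_edge_signature : Prop := ∀ (adj : List (Int × List Int)) (u : Int) (v : Int), Dom_edge_signature adj u v → Pre_edge_signature adj u v → Spec_edge_signature adj u v (edge_signature adj u v)

-- ===== LEMMAS AND PROOFS =====

-- generic list plumbing -------------------------------------------------------

lemma foldl_flatMap_eq {α β σ : Type} (l : List α) (g : α → List β) (f : σ → β → σ) (s : σ) :
    (l.flatMap g).foldl f s = l.foldl (fun s a => (g a).foldl f s) s := by
  induction l generalizing s with
  | nil => rfl
  | cons x t ih => simp [List.flatMap_cons, List.foldl_append, ih]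

lemma sum_map_ite_length {α : Type} (l : List α) (p : α → Bool) :
    (l.map (fun y => if p y then 1 else 0)).sum = (l.filter p).length := by
  induction l with
  | nil => rfl
  | cons x t ih => by_cases h : p x <;> simp [h, ih] <;> omega

lemma length_filter_not {α : Type} (l : List α) (p : α → Bool) :
    (l.filter (fun x => !p x)).length = l.length - (l.filter p).length := by
  induction l with
  | nil => rfl
  | cons x t ih =>
    have hle := List.length_filter_le p t
    by_cases h : p x <;> simp [h, ih] <;> omega

-- sorted2 with distinct first keys --------------------------------------------

lemma insertBy_congr {α : Type} (b1 b2 : α → α → Bool) (x : α) (ys : List α)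
    (h : ∀ y ∈ ys, b1 x y = b2 x y) :
    PySem.List.insertBy b1 x ys = PySem.List.insertBy b2 x ys := by
  induction ys with
  | nil => rfl
  | cons y t ih =>
    have hy := h y (by simp)
    by_cases hb : b1 x y
    · simp [PySem.List.insertBy, hb, hy ▸ hb]
    · have : b2 x y = false := by rw [← hy]; simpa using hb
      simp [PySem.List.insertBy, hb, this, ih (fun z hz => h z (by simp [hz]))]

lemma foldl_insertBy_congr {α : Type} (b1 b2 : α → α → Bool) (l acc : List α)
    (h : ∀ x y : α, (x ∈ l ∨ x ∈ acc) → (y ∈ l ∨ y ∈ acc) → b1 x y = b2 x y) :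
    l.foldl (fun acc x => PySem.List.insertBy b1 x acc) acc
      = l.foldl (fun acc x => PySem.List.insertBy b2 x acc) acc := by
  induction l generalizing acc with
  | nil => rfl
  | cons x t ih =>
    simp only [List.foldl_cons]
    rw [insertBy_congr b1 b2 x acc (fun y hy => h x y (Or.inl (by simp)) (Or.inr hy))]
    exact ih _ (fun a b ha hb => by
      refine h a b ?_ ?_
      · rcases ha with ha | ha
        · exact Or.inl (by simp [ha])
        · rcases (PySem.List.mem_insertBy b2 x a acc).1 ha with rfl | ha
          · exact Or.inl (by simp)
          · exact Or.inr ha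
      · rcases hb with hb | hb
        · exact Or.inl (by simp [hb])
        · rcases (PySem.List.mem_insertBy b2 x b acc).1 hb with rfl | hb
          · exact Or.inl (by simp)
          · exact Or.inr hb)

lemma sorted2_eq_sorted_fst (l : List (Int × Int)) (hnd : (l.map Prod.fst).Nodup) :
    PySem.List.sorted2 l Prod.fst Prod.snd false = PySem.List.sorted l Prod.fst false := by
  have hinj : ∀ x ∈ l, ∀ y ∈ l, x.1 = y.1 → x = y :=
    (List.nodup_map_iff_inj_on (hnd.of_map)).1 hnd
  rw [PySem.List.sorted_eq_foldl_insertBy]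
  show l.foldl (fun acc x => PySem.List.insertBy _ x acc) [] = _
  refine foldl_insertBy_congr _ _ l [] ?_
  intro x y hx hy
  simp only [List.mem_nil_iff, or_false] at hx hy
  rcases lt_trichotomy x.1 y.1 with h | h | h
  · simp [h]
  · have hxy : x = y := hinj x hx y hy h
    subst hxy
    simp
  · simp [h, not_lt.2 (le_of_lt h), not_lt.2 (le_of_lt h) ]

lemma nodup_map_pairwise_ne {α β : Type} (f : α → β) (l : List α)
    (h : (l.map f).Nodup) : l.Pairwise (fun a b => f a ≠ f b) := by
  rw [List.Nodup, List.pairwise_map] at h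
  exact h

lemma sorted2_eq_of_perm (l l' : List (Int × Int)) (hperm : l.Perm l')
    (hnd : (l.map Prod.fst).Nodup) :
    PySem.List.sorted2 l Prod.fst Prod.snd false = PySem.List.sorted2 l' Prod.fst Prod.snd false := by
  have hnd' : (l'.map Prod.fst).Nodup := ((hperm.map Prod.fst).nodup_iff).1 hnd
  rw [sorted2_eq_sorted_fst l hnd, sorted2_eq_sorted_fst l' hnd']
  refine Eq.symm (PySem.List.sorted_eq_of_perm_of_pairwise_lt l' (PySem.List.sorted l Prod.fst false) Prod.fst ?_ ?_)
  · exact (PySem.List.sorted_perm l Prod.fst false).trans hperm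
  · have hle := PySem.List.sorted_pairwise l Prod.fst
    have hndS : ((PySem.List.sorted l Prod.fst false).map Prod.fst).Nodup :=
      (((PySem.List.sorted_perm l Prod.fst false).map Prod.fst).nodup_iff).2 hnd
    have hne := nodup_map_pairwise_ne Prod.fst _ hndS
    exact (hle.and hne).imp (fun h => lt_of_le_of_ne h.1 h.2)

-- bucket dictionaries ----------------------------------------------------------

-- the size that A computes for a pair
def pvSz (d : PySem.Dict Int (List Int)) (a b : Int) : Int :=
  PySem.Set.len (PySem.Set.inter (pvAdjAt d a) (pvAdjAt d b))

def pvBucket (d : PySem.Dict Int (List Int)) (U : List Int) : PySem.Dict Int (List Int) :=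
  List.foldl (fun m a => List.foldl (fun m c => PySem.Dict.modify m c [] (· ++ [a])) m (pvAdjAt d a))
    PySem.Dict.empty U

def pvPairsOf (d : PySem.Dict Int (List Int)) (U : List Int) : List (Int × Int) :=
  U.flatMap (fun a => (pvAdjAt d a).map (fun c => (c, a)))

lemma pvBucket_eq (d : PySem.Dict Int (List Int)) (U : List Int) :
    pvBucket d U
      = (pvPairsOf d U).foldl (fun m p => PySem.Dict.modify m p.1 [] (· ++ [p.2])) PySem.Dict.empty := by
  rw [pvPairsOf, foldl_flatMap_eq]
  unfold pvBucket
  simp only [List.foldl_map]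

lemma filter_beq_of_nodup (l : List Int) (hl : l.Nodup) (c : Int) :
    l.filter (fun x => x == c) = if c ∈ l then [c] else [] := by
  induction l with
  | nil => simp
  | cons x t ih =>
    rcases List.nodup_cons.1 hl with ⟨hx, ht⟩
    by_cases hxc : x = c
    · subst hxc
      have h0 : t.filter (fun y => y == x) = [] :=
        List.filter_eq_nil_iff.2 (fun a ha => by simp; rintro rfl; exact hx ha)
      simp [h0]
    · rw [List.filter_cons]
      simp only [show (x == c) = false from by simpa using hxc, Bool.false_eq_true, if_false, ih ht]
      by_cases hct : c ∈ t <;>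
        simp [hct, List.mem_cons, show ¬ c = x from fun h => hxc h.symm]

lemma flatMap_ite_eq_filter {α : Type} (l : List α) (p : α → Bool) :
    l.flatMap (fun a => if p a then [a] else []) = l.filter p := by
  induction l with
  | nil => rfl
  | cons x t ih => by_cases h : p x <;> simp [h, ih]

lemma pvBucket_getD (d : PySem.Dict Int (List Int)) (U : List Int) (c : Int) :
    (pvBucket d U).getD c [] = U.filter (fun a => (pvAdjAt d a).contains c) := by
  rw [pvBucket_eq, PySem.Dict.getD_foldl_modify_append, PySem.Dict.getD_empty]
  rw [pvPairsOf, List.filter_flatMap, List.map_flatMap]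
  rw [← flatMap_ite_eq_filter U (fun a => (pvAdjAt d a).contains c)]
  refine List.flatMap_congr ?_
  intro a _
  rw [List.filter_map]
  have : ((fun p : Int × Int => p.1 == c) ∘ fun c' => (c', a)) = (fun x => x == c) := by
    funext x; rfl
  have hnd : (pvAdjAt d a).Nodup := by rw [pvAdjAt]; exact PySem.Set.nodup_ofList _
  rw [this, filter_beq_of_nodup (pvAdjAt d a) hnd c]
  by_cases hm : c ∈ pvAdjAt d a
  · simp [hm, PySem.Set.contains, List.contains_iff_mem.2 hm]
  · have hc : (pvAdjAt d a).contains c = false := by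
      rw [show (pvAdjAt d a).contains c = List.contains (pvAdjAt d a) c from rfl]
      exact Bool.eq_false_iff.2 (fun h => hm (List.contains_iff_mem.1 h))
    simp [hm, hc]

lemma pvBucket_keys_eq (d : PySem.Dict Int (List Int)) (U : List Int) :
    (pvBucket d U).keys = PySem.Set.ofList ((pvPairsOf d U).map Prod.fst) := by
  rw [pvBucket_eq]
  rw [PySem.Dict.keys_foldl_modify_key (pvPairsOf d U) Prod.fst [] (fun _ p l => l ++ [p.2])]
  rw [PySem.Dict.keys_empty, PySem.Set.ofList_eq_foldl]
  rfl

lemma pvBucket_keys_mem (d : PySem.Dict Int (List Int)) (U : List Int) (c : Int) :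
    c ∈ (pvBucket d U).keys ↔ ∃ a ∈ U, c ∈ pvAdjAt d a := by
  rw [pvBucket_keys_eq, PySem.Set.mem_ofList, pvPairsOf]
  simp only [List.map_flatMap, List.mem_flatMap, List.map_map, List.mem_map]
  constructor
  · rintro ⟨a, ha, c', hc', hcc⟩
    exact ⟨a, ha, by simpa [← hcc] using hc'⟩
  · rintro ⟨a, ha, hc⟩
    exact ⟨a, ha, c, hc, rfl⟩

lemma pvBucket_keys_nodup (d : PySem.Dict Int (List Int)) (U : List Int) :
    (pvBucket d U).keys.Nodup := by
  rw [pvBucket_keys_eq]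
  exact PySem.Set.nodup_ofList _

-- membership/contains bridges ------------------------------------------------

lemma pvContains_iff (d : PySem.Dict Int (List Int)) (x c : Int) :
    (pvAdjAt d x).contains c = true ↔ c ∈ pvAdjAt d x := by
  rw [show (pvAdjAt d x).contains c = List.contains (pvAdjAt d x) c from rfl]
  exact List.contains_iff_mem

lemma pvAdjAt_nodup (d : PySem.Dict Int (List Int)) (x : Int) : (pvAdjAt d x).Nodup := by
  rw [pvAdjAt]; exact PySem.Set.nodup_ofList _

-- the pair list B's co-occurrence counter counts -------------------------------

def pvAs (d : PySem.Dict Int (List Int)) (U : List Int) (c : Int) : List Int :=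
  U.filter (fun a => (pvAdjAt d a).contains c)

def pvP (d : PySem.Dict Int (List Int)) (U V : List Int) : List (Int × Int) :=
  (pvBucket d U).keys.flatMap (fun c => (pvAs d U c).flatMap (fun a => (pvAs d V c).map (fun b => (a, b))))

def pvSzN (d : PySem.Dict Int (List Int)) (a b : Int) : Nat :=
  ((pvAdjAt d a).filter (fun c => (pvAdjAt d b).contains c)).length

lemma pvSz_eq_cast (d : PySem.Dict Int (List Int)) (a b : Int) :
    pvSz d a b = (pvSzN d a b : Int) := rfl

def pvSizes (d : PySem.Dict Int (List Int)) (U V : List Int) : List Int :=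
  U.flatMap (fun a => V.map (fun b => pvSz d a b))

lemma pc_eq_counter (d : PySem.Dict Int (List Int)) (U V : List Int) :
    List.foldl (fun pc cAs =>
        let Bs := PySem.Dict.getD (pvBucket d V) cAs.1 []
        if Bs ≠ [] then
          List.foldl (fun pc a => List.foldl (fun pc b => PySem.Dict.modify pc (a, b) 0 (· + 1)) pc Bs) pc cAs.2
        else pc)
      PySem.Dict.empty (pvBucket d U).items
    = PySem.Dict.counter (pvP d U V) := by
  rw [PySem.Dict.items_eq_map_keys _ (pvBucket_keys_nodup d U) [], List.foldl_map]
  rw [PySem.Dict.counter_eq_foldl, pvP, foldl_flatMap_eq]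
  refine PySem.List.foldl_congr_mem _ _ _ _ ?_
  intro pc c _
  simp only
  rw [pvBucket_getD d V c, pvBucket_getD d U c]
  rw [show (U.filter (fun a => (pvAdjAt d a).contains c)) = pvAs d U c from rfl,
      show (V.filter (fun b => (pvAdjAt d b).contains c)) = pvAs d V c from rfl]
  by_cases hBs : pvAs d V c = []
  · rw [if_neg (by simp [hBs])]
    rw [hBs, show (List.flatMap (fun a => List.map (fun b => (a, b)) ([] : List Int)) (pvAs d U c)) = [] from by simp]
    rfl
  · rw [if_pos hBs]
    rw [foldl_flatMap_eq]
    refine PySem.List.foldl_congr_mem _ _ _ _ ?_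
    intro pc' a _
    rw [List.foldl_map]

-- counting ---------------------------------------------------------------------

lemma count_pair_block (As Bs : List Int) (a b : Int) :
    (As.flatMap (fun a' => Bs.map (fun b' => (a', b')))).count (a, b) = As.count a * Bs.count b := by
  induction As with
  | nil => simp
  | cons x t ih =>
    have hmap : ((Bs.map (fun b' => (x, b'))).count (a, b)) = if x = a then Bs.count b else 0 := by
      by_cases hx : x = a
      · subst hx
        simpa using List.count_map_of_injective Bs (fun b' => (x, b'))
          (fun b1 b2 h => congrArg Prod.snd h) b
      · simp only [if_neg hx]
        refine List.count_eq_zero.2 ?_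
        simp only [List.mem_map, not_exists]
        rintro b' ⟨_, heq⟩
        exact hx (congrArg Prod.fst heq)
    by_cases hx : x = a
    · subst hx
      rw [List.flatMap_cons, List.count_append, ih, hmap, if_pos rfl]
      simp [List.count_cons]
      ring
    · rw [List.flatMap_cons, List.count_append, ih, hmap, if_neg hx, List.count_cons,
          show (x == a) = false from by simpa using hx]
      simp

lemma count_filter_nodup (U : List Int) (hU : U.Nodup) (p : Int → Bool) (a : Int) :
    (U.filter p).count a = if a ∈ U ∧ p a then 1 else 0 := by
  by_cases hm : a ∈ U ∧ p a
  · rw [if_pos hm]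
    exact List.count_eq_one_of_mem (hU.filter p) (List.mem_filter.2 ⟨hm.1, hm.2⟩)
  · rw [if_neg hm]
    refine List.count_eq_zero.2 (fun hmem => hm ?_)
    have := List.mem_filter.1 hmem
    exact ⟨this.1, this.2⟩

lemma count_P (d : PySem.Dict Int (List Int)) (U V : List Int) (hU : U.Nodup) (hV : V.Nodup)
    (a b : Int) (ha : a ∈ U) (hb : b ∈ V) :
    (pvP d U V).count (a, b)
      = ((pvBucket d U).keys.filter
          (fun c => (pvAdjAt d a).contains c && (pvAdjAt d b).contains c)).length := by
  rw [pvP, List.count_flatMap]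
  have hstep : ∀ c ∈ (pvBucket d U).keys,
      ((List.count (a, b) ∘ fun c => (pvAs d U c).flatMap (fun a' => (pvAs d V c).map (fun b' => (a', b')))) c)
        = if ((pvAdjAt d a).contains c && (pvAdjAt d b).contains c) then 1 else 0 := by
    intro c _
    simp only [Function.comp_apply]
    rw [count_pair_block, pvAs, pvAs, count_filter_nodup U hU _ a, count_filter_nodup V hV _ b]
    by_cases h1 : c ∈ pvAdjAt d a <;> by_cases h2 : c ∈ pvAdjAt d b <;>
      simp [h1, h2, ha, hb, pvContains_iff]
  rw [List.map_congr_left hstep, sum_map_ite_length]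

lemma count_P_eq_szN (d : PySem.Dict Int (List Int)) (U V : List Int) (hU : U.Nodup) (hV : V.Nodup)
    (a b : Int) (ha : a ∈ U) (hb : b ∈ V) :
    (pvP d U V).count (a, b) = pvSzN d a b := by
  rw [count_P d U V hU hV a b ha hb, pvSzN]
  refine List.Perm.length_eq ?_
  refine (List.perm_ext_iff_of_nodup ((pvBucket_keys_nodup d U).filter _) ((pvAdjAt_nodup d a).filter _)).2 ?_
  intro c
  simp only [List.mem_filter, Bool.and_eq_true]
  constructor
  · rintro ⟨-, h1, h2⟩
    exact ⟨(pvContains_iff d a c).1 h1, h2⟩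
  · rintro ⟨h1, h2⟩
    exact ⟨(pvBucket_keys_mem d U c).2 ⟨a, ha, h1⟩, (pvContains_iff d a c).2 h1, h2⟩

lemma mem_P (d : PySem.Dict Int (List Int)) (U V : List Int) (a b : Int) :
    (a, b) ∈ pvP d U V ↔ a ∈ U ∧ b ∈ V ∧ pvSzN d a b ≠ 0 := by
  simp only [pvP, List.mem_flatMap, List.mem_map, pvAs, List.mem_filter]
  constructor
  · rintro ⟨c, hcK, a', ⟨haU, hca⟩, b', ⟨hbV, hcb⟩, heq⟩
    have ha' : a' = a := congrArg Prod.fst heq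
    have hb' : b' = b := congrArg Prod.snd heq
    refine ⟨ha' ▸ haU, hb' ▸ hbV, ?_⟩
    have hmem : c ∈ (pvAdjAt d a).filter (fun c => (pvAdjAt d b).contains c) :=
      List.mem_filter.2 ⟨(pvContains_iff d a c).1 (ha' ▸ hca), hb' ▸ hcb⟩
    rw [pvSzN]
    intro h
    rw [List.length_eq_zero_iff] at h
    rw [h] at hmem
    exact absurd hmem (List.not_mem_nil)
  · rintro ⟨haU, hbV, hsz⟩
    rw [pvSzN] at hsz
    obtain ⟨c, hc⟩ := List.exists_mem_of_ne_nil
      ((pvAdjAt d a).filter (fun c => (pvAdjAt d b).contains c))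
      (fun h => hsz (by rw [h]; rfl))
    have hc' := List.mem_filter.1 hc
    refine ⟨c, (pvBucket_keys_mem d U c).2 ⟨a, haU, hc'.1⟩, a, ⟨haU, (pvContains_iff d a c).2 hc'.1⟩, b, ⟨hbV, hc'.2⟩, rfl⟩

-- A's counter ------------------------------------------------------------------

lemma crossA_eq (d : PySem.Dict Int (List Int)) (U V : List Int) :
    List.foldl (fun c a =>
      List.foldl (fun c b =>
        PySem.Dict.modify c (PySem.Set.len (PySem.Set.inter (pvAdjAt d a) (pvAdjAt d b))) 0 (· + 1)) c V)
      PySem.Dict.empty U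
    = PySem.Dict.counter (pvSizes d U V) := by
  rw [PySem.Dict.counter_eq_foldl, pvSizes, foldl_flatMap_eq]
  refine PySem.List.foldl_congr_mem _ _ _ _ ?_
  intro acc a _
  rw [List.foldl_map]
  rfl

lemma sizes_eq (d : PySem.Dict Int (List Int)) (U V : List Int) :
    pvSizes d U V = (U ×ˢ V).map (fun p => pvSz d p.1 p.2) := by
  rw [show U ×ˢ V = U.flatMap (fun a => V.map (fun b => (a, b))) from rfl, List.map_flatMap]
  refine List.flatMap_congr ?_
  intro a _
  rw [List.map_map]
  rfl

lemma mem_map_pairfun (l : List Int) (f : Int → Int) (k n : Int) :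
    (k, n) ∈ l.map (fun x => (x, f x)) ↔ k ∈ l ∧ n = f k := by
  simp only [List.mem_map]
  constructor
  · rintro ⟨x, hx, heq⟩
    have h1 : x = k := congrArg Prod.fst heq
    have h2 : f x = n := congrArg Prod.snd heq
    exact ⟨h1 ▸ hx, (h1 ▸ h2).symm⟩
  · rintro ⟨hk, rfl⟩
    exact ⟨k, hk, rfl⟩

-- the sorted histograms agree --------------------------------------------------

lemma cross_items_eq (d : PySem.Dict Int (List Int)) (U V : List Int)
    (hU : U.Nodup) (hV : V.Nodup) :
    PySem.List.sorted2 (PySem.Dict.counter (pvSizes d U V)).items Prod.fst Prod.snd false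
      = PySem.List.sorted2
          (if 0 < PySem.Set.len U * PySem.Set.len V - ((PySem.Dict.counter (pvP d U V)).size : Int)
           then (PySem.Dict.counter (PySem.Dict.counter (pvP d U V)).values).insert 0
                  (PySem.Set.len U * PySem.Set.len V - ((PySem.Dict.counter (pvP d U V)).size : Int))
           else PySem.Dict.counter (PySem.Dict.counter (pvP d U V)).values).items
          Prod.fst Prod.snd false := by
  -- abbreviations
  set P := pvP d U V with hP
  set sizes := pvSizes d U V with hsizes
  set vals := (PySem.Dict.counter P).values with hvals
  set zero : Int := PySem.Set.len U * PySem.Set.len V - ((PySem.Dict.counter P).size : Int) with hzero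
  -- vals as the multiset of nonzero sizes
  have hvals_eq : vals = (PySem.Set.ofList P).map (fun p => pvSz d p.1 p.2) := by
    rw [hvals, show (PySem.Dict.counter P).values = (PySem.Dict.counter P).items.map (fun x => x.2) from rfl,
        PySem.Dict.items_counter, List.map_map]
    refine List.map_congr_left ?_
    intro p hp
    have hpP : p ∈ P := (PySem.Set.mem_ofList P p).1 hp
    have hm := (mem_P d U V p.1 p.2).1 (by rwa [Prod.mk.eta])
    simp only [Function.comp_apply]
    rw [show List.count p P = List.count (p.1, p.2) P from by rw [Prod.mk.eta],
        count_P_eq_szN d U V hU hV p.1 p.2 hm.1 hm.2.1, pvSz_eq_cast]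
  have hpairs_nodup : (U ×ˢ V).Nodup := hU.product hV
  have hkeysPerm : (PySem.Set.ofList P).Perm ((U ×ˢ V).filter (fun p => !(pvSz d p.1 p.2 == 0))) := by
    refine (List.perm_ext_iff_of_nodup (PySem.Set.nodup_ofList P) (hpairs_nodup.filter _)).2 ?_
    intro q
    rw [PySem.Set.mem_ofList, List.mem_filter,
        show (q ∈ P) = ((q.1, q.2) ∈ P) from by rw [Prod.mk.eta],
        show (q ∈ U ×ˢ V) = ((q.1, q.2) ∈ U ×ˢ V) from by rw [Prod.mk.eta],
        mem_P, show (U ×ˢ V) = U.product V from rfl, List.pair_mem_product, pvSz_eq_cast]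
    constructor
    · rintro ⟨h1, h2, h3⟩
      refine ⟨⟨h1, h2⟩, by simpa using h3⟩
    · rintro ⟨⟨h1, h2⟩, h3⟩
      exact ⟨h1, h2, by simpa using h3⟩
  have hvalsPerm : vals.Perm (sizes.filter (fun k => !(k == 0))) := by
    rw [hvals_eq, hsizes, sizes_eq, List.filter_map]
    exact hkeysPerm.map _
  -- length bookkeeping
  have hsizes_len : sizes.length = U.length * V.length := by
    rw [hsizes, sizes_eq, List.length_map, List.length_product]
  have hvals_len : vals.length = (PySem.Set.ofList P).length := by
    rw [hvals_eq, List.length_map]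
  have hsize_eq : (PySem.Dict.counter P).size = (PySem.Set.ofList P).length := by
    rw [show (PySem.Dict.counter P).size = (PySem.Dict.counter P).items.length from rfl,
        PySem.Dict.items_counter, List.length_map]
  have hcount0 : sizes.count 0 = sizes.length - vals.length := by
    rw [show List.count (0 : Int) sizes = List.countP (· == (0 : Int)) sizes from rfl,
        List.countP_eq_length_filter, hvalsPerm.length_eq]
    have := length_filter_not sizes (fun k => k == 0)
    have hco : (fun k : Int => !(k == 0)) = (fun k : Int => !(fun k : Int => k == 0) k) := rfl
    rw [hco, this]
    have hle := List.length_filter_le (fun k : Int => k == (0:Int)) sizes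
    omega
  have hfle : vals.length ≤ sizes.length := by
    rw [hvalsPerm.length_eq]
    exact List.length_filter_le _ _
  have hzero_eq : zero = (sizes.length : Int) - (vals.length : Int) := by
    rw [hzero, hsize_eq, ← hvals_len, hsizes_len,
        show PySem.Set.len U = (U.length : Int) from rfl,
        show PySem.Set.len V = (V.length : Int) from rfl]
    push_cast
    ring
  have h0notvals : (0 : Int) ∉ vals := by
    rw [hvals_eq]
    intro hmem
    obtain ⟨p, hp, hpe⟩ := List.mem_map.1 hmem
    have hm := (mem_P d U V p.1 p.2).1 (by rw [Prod.mk.eta]; exact (PySem.Set.mem_ofList P p).1 hp)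
    rw [pvSz_eq_cast] at hpe
    exact hm.2.2 (by exact_mod_cast hpe)
  have hcnt : (List.count (0:Int) sizes : Int) = zero := by
    rw [hcount0, hzero_eq, Nat.cast_sub hfle]
  -- counts agree away from zero
  have hcount_ne : ∀ k : Int, k ≠ 0 → vals.count k = sizes.count k := by
    intro k hk
    rw [hvalsPerm.count_eq]
    exact List.count_filter (by simpa using hk)
  have hmem_ne : ∀ k : Int, k ≠ 0 → (k ∈ vals ↔ k ∈ sizes) := by
    intro k hk
    rw [hvalsPerm.mem_iff, List.mem_filter]
    constructor
    · exact fun h => h.1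
    · exact fun h => ⟨h, by simpa using hk⟩
  -- item lists
  have hitemsA : (PySem.Dict.counter sizes).items
      = (PySem.Set.ofList sizes).map (fun k => (k, (sizes.count k : Int))) := PySem.Dict.items_counter sizes
  have hndA : ((PySem.Dict.counter sizes).items.map Prod.fst).Nodup := by
    rw [hitemsA, List.map_map,
        show (Prod.fst ∘ fun k : Int => (k, (sizes.count k : Int))) = id from rfl, List.map_id]
    exact PySem.Set.nodup_ofList sizes
  -- final: the two item lists are permutations of each other
  refine sorted2_eq_of_perm _ _ ?_ hndA
  by_cases hz : 0 < zero
  · rw [if_pos hz]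
    have hcont : (PySem.Dict.counter vals).contains 0 = false := by
      rw [PySem.Dict.contains_eq_decide_mem_keys, PySem.Dict.keys_counter]
      simp [PySem.Set.mem_ofList, h0notvals]
    rw [PySem.Dict.items_insert_of_not_contains _ _ hcont]
    have hndB : (((PySem.Dict.counter vals).items ++ [((0 : Int), zero)]).map Prod.fst).Nodup := by
      rw [List.map_append, PySem.Dict.items_counter, List.map_map,
          show (Prod.fst ∘ fun k : Int => (k, (vals.count k : Int))) = id from rfl, List.map_id]
      refine List.Nodup.append (PySem.Set.nodup_ofList vals) (by simp) ?_
      intro x hx hy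
      simp only [List.map_cons, List.map_nil, List.mem_singleton] at hy
      exact h0notvals (hy ▸ (PySem.Set.mem_ofList vals x).1 hx)
    refine (List.perm_ext_iff_of_nodup (List.Nodup.of_map _ hndA) (List.Nodup.of_map _ hndB)).2 ?_
    rintro ⟨k, n⟩
    rw [hitemsA, mem_map_pairfun, List.mem_append, PySem.Dict.items_counter, mem_map_pairfun,
        List.mem_singleton, Prod.mk.injEq, PySem.Set.mem_ofList, PySem.Set.mem_ofList]
    by_cases hk : k = 0
    · subst hk
      constructor
      · rintro ⟨h1, rfl⟩
        exact Or.inr ⟨rfl, hcnt⟩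
      · rintro (⟨h1, _⟩ | ⟨_, rfl⟩)
        · exact absurd h1 h0notvals
        · have hpos : (0:Int) < (List.count (0:Int) sizes : Int) := hcnt ▸ hz
          have h0mem : (0:Int) ∈ sizes := List.count_pos_iff.1 (by exact_mod_cast hpos)
          exact ⟨h0mem, hcnt.symm⟩
    · constructor
      · rintro ⟨h1, rfl⟩
        exact Or.inl ⟨(hmem_ne k hk).2 h1, by rw [hcount_ne k hk]⟩
      · rintro (⟨h1, rfl⟩ | ⟨h1, _⟩)
        · exact ⟨(hmem_ne k hk).1 h1, by rw [hcount_ne k hk]⟩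
        · exact absurd h1 hk
  · rw [if_neg hz]
    have hndB : ((PySem.Dict.counter vals).items.map Prod.fst).Nodup := by
      rw [PySem.Dict.items_counter, List.map_map,
          show (Prod.fst ∘ fun k : Int => (k, (vals.count k : Int))) = id from rfl, List.map_id]
      exact PySem.Set.nodup_ofList vals
    refine (List.perm_ext_iff_of_nodup (List.Nodup.of_map _ hndA) (List.Nodup.of_map _ hndB)).2 ?_
    rintro ⟨k, n⟩
    rw [hitemsA, mem_map_pairfun, PySem.Dict.items_counter, mem_map_pairfun,
        PySem.Set.mem_ofList, PySem.Set.mem_ofList]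
    by_cases hk : k = 0
    · subst hk
      constructor
      · rintro ⟨h1, _⟩
        exfalso
        have hpos : 0 < List.count (0:Int) sizes := List.count_pos_iff.2 h1
        refine hz ?_
        rw [← hcnt]
        exact_mod_cast hpos
      · rintro ⟨h1, _⟩
        exact absurd h1 h0notvals
    · constructor
      · rintro ⟨h1, rfl⟩
        exact ⟨(hmem_ne k hk).2 h1, by rw [hcount_ne k hk]⟩
      · rintro ⟨h1, rfl⟩
        exact ⟨(hmem_ne k hk).1 h1, by rw [hcount_ne k hk]⟩

-- ===== VERDICT (by name: the statement is the Claim_ definition above) =====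
theorem edge_signature_spec : Claim_equal_edge_signature := by
  intro adj u v _ _
  show edge_signature adj u v = edge_signature_alt adj u v
  unfold edge_signature edge_signature_alt
  dsimp only
  simp only [Prod.mk.injEq]
  refine ⟨trivial, trivial, trivial, ?_⟩
  set d := pvDictOf adj with hd
  set nu := PySem.Set.diff (pvAdjAt d u) (PySem.Set.ofList [v]) with hnu
  set nv := PySem.Set.diff (pvAdjAt d v) (PySem.Set.ofList [u]) with hnv
  set OU := PySem.Set.diff nu nv with hOU
  set OV := PySem.Set.diff nv nu with hOV
  have hOUnd : OU.Nodup := List.Nodup.filter _ (List.Nodup.filter _ (pvAdjAt_nodup d u))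
  have hOVnd : OV.Nodup := List.Nodup.filter _ (List.Nodup.filter _ (pvAdjAt_nodup d v))
  rw [crossA_eq d OU OV]
  by_cases hg : OU ≠ [] ∧ OV ≠ []
  · rw [if_pos hg]
    rw [show (List.foldl (fun m a => List.foldl (fun m c => PySem.Dict.modify m c [] (· ++ [a])) m (pvAdjAt d a)) PySem.Dict.empty OU) = pvBucket d OU from rfl,
        show (List.foldl (fun m b => List.foldl (fun m c => PySem.Dict.modify m c [] (· ++ [b])) m (pvAdjAt d b)) PySem.Dict.empty OV) = pvBucket d OV from rfl]
    rw [pc_eq_counter d OU OV]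
    exact cross_items_eq d OU OV hOUnd hOVnd
  · rw [if_neg hg]
    rcases not_and_or.1 hg with h | h
    · have h' : OU = [] := not_not.1 h
      rw [h']
      rw [if_neg (by simp [PySem.Set.len])]
      rfl
    · have h' : OV = [] := not_not.1 h
      rw [h']
      rw [show pvSizes d OU [] = [] from by simp [pvSizes]]
      rw [if_neg (by simp [PySem.Set.len])]
      rfl
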